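-- pv_equiv track=rewrite | github.com/MrBrantCode/unitest_baseline | mut_generate/mist_train_cf/cf_24772/solution.py | all_vowels_palindrome
-- ===== SOURCE A (Python) =====
-- def all_vowels_palindrome(word):
--     vowels = ['a', 'e', 'i', 'o', 'u']
--     if not word == word[::-1]:
--         return False
--     for char in vowels:
--         if char not in word:
--             return False
--     return True
-- ===== SOURCE B (Python) =====
-- def all_vowels_palindrome(word):
--     seen = set()
--     i, j = 0, len(word) - 1
--     while i <= j:
--         if word[i] != word[j]:
--             return False
--         if word[i] in 'aeiou':
--             seen.add(word[i])
--         if word[j] in 'aeiou':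
--             seen.add(word[j])
--         i += 1
--         j -= 1
--     return all(v in seen for v in 'aeiou')
-- ===== Notes on version B (the rewrite author's own statement) =====
-- stated objective: alternative
-- what changed: Replaces A's slice-reverse comparison followed by five separate vowel membership scans with a single two-pointer pass that checks the palindrome property pairwise while collecting the vowels seen into a set, deciding vowel coverage from that set at the end.
import Mathlib
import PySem

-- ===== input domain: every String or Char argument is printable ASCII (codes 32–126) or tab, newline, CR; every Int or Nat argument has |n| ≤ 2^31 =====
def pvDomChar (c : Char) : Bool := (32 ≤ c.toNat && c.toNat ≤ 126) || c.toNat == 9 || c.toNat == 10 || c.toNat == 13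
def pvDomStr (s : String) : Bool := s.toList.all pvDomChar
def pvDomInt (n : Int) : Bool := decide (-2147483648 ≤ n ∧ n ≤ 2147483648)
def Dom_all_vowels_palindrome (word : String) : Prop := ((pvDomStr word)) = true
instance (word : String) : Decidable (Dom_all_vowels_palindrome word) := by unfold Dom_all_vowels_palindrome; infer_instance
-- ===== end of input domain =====

-- B fuses the slice-reverse comparison and the five membership scans of A into one
-- two-pointer pass that checks the palindrome pairwise while collecting seen vowels (objective: alternative).

-- ===== PORT A =====
-- for char in vowels: if char not in word: return False  — early-exit scan over the vowel list
def aVowelLoop (vowels : List Char) (w : List Char) : Bool :=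
  match vowels with
  | [] => true
  | c :: rest => if !(PySem.Chars.isIn [c] w) then false else aVowelLoop rest w

def all_vowels_palindrome (word : String) : Bool :=
  let vowels : List Char := ['a', 'e', 'i', 'o', 'u']
  -- word == word[::-1]; word[::-1] never raises (step = -1 ≠ 0), so getD is never used
  if !(word.toList == (PySem.List.slice? word.toList none none (-1)).getD []) then false
  else aVowelLoop vowels word.toList

-- ===== PORT B =====
-- while i <= j: compare word[i], word[j], collect vowels into seen; i, j move inward.
-- j = len(word)-1-i throughout, so only i is carried; guard i ≤ j is 2*i+1 ≤ n.
def bLoop (l : List Char) (i : Nat) (seen : PySem.Set Char) : Bool :=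
  if h : 2 * i + 1 ≤ l.length then
    let ci := l[i]'(by omega)
    let cj := l[l.length - 1 - i]'(by omega)
    if ci ≠ cj then false
    else
      let s1 := if ("aeiou".toList).contains ci then PySem.Set.add seen ci else seen
      let s2 := if ("aeiou".toList).contains cj then PySem.Set.add s1 cj else s1
      bLoop l (i + 1) s2
  else
    ("aeiou".toList).all (fun v => PySem.Set.contains seen v)
termination_by l.length - i

def all_vowels_palindrome_alt (word : String) : Bool :=
  bLoop word.toList 0 PySem.Set.empty

-- ===== PRECONDITION & SPEC =====
def Spec_all_vowels_palindrome (word : String) (out : Bool) : Prop := out = all_vowels_palindrome_alt word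
instance (word : String) (out : Bool) : Decidable (Spec_all_vowels_palindrome word out) := by unfold Spec_all_vowels_palindrome; infer_instance

-- ===== CLAIM (what is proved, stated in full; the proofs are below) =====
def Claim_equal_all_vowels_palindrome : Prop := ∀ (word : String), Dom_all_vowels_palindrome word → Spec_all_vowels_palindrome word (all_vowels_palindrome word)

-- ===== LEMMAS AND PROOFS =====

lemma vowels_toList : "aeiou".toList = ['a', 'e', 'i', 'o', 'u'] := rfl

-- single-character membership: 'c in word' is list membership
lemma singleton_isIn (c : Char) (w : List Char) :
    PySem.Chars.isIn [c] w = w.contains c := by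
  rw [Bool.eq_iff_iff, PySem.Chars.isIn_iff_infix, List.contains_iff_mem]
  constructor
  · intro h; exact h.subset (by simp)
  · intro hc
    obtain ⟨s, t, rfl⟩ := List.append_of_mem hc
    exact ⟨s, t, by simp⟩

-- the pairs with index ≥ i that B still has to check
def pairsOK (l : List Char) (i : Nat) : Bool :=
  decide (∀ p, p < l.length → i ≤ p → 2 * p + 1 ≤ l.length → l[p]? = l[l.length - 1 - p]?)

-- the middle segment B has not yet scanned: positions i .. l.length-1-i
def mid (l : List Char) (i : Nat) : List Char := (l.drop i).take (l.length - 2 * i)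

lemma mid_zero (l : List Char) : mid l 0 = l := by simp [mid]

lemma mid_stop (l : List Char) (i : Nat) (h : l.length ≤ 2 * i) : mid l i = [] := by
  simp [mid, Nat.sub_eq_zero_of_le h]

lemma mid_single (l : List Char) (i : Nat) (h : 2 * i + 1 = l.length) :
    mid l i = [l[i]'(by omega)] := by
  have hi : i < l.length := by omega
  have h1 : l.length - 2 * i = 1 := by omega
  rw [mid, List.drop_eq_getElem_cons hi, h1, List.take_succ_cons, List.take_zero]

lemma mid_decomp (l : List Char) (i : Nat) (h : 2 * i + 2 ≤ l.length) :
    mid l i = l[i]'(by omega) :: (mid l (i + 1) ++ [l[l.length - 1 - i]'(by omega)]) := by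
  have hi : i < l.length := by omega
  have h1 : l.length - 2 * i = (l.length - 2 * (i + 1)) + 1 + 1 := by omega
  rw [mid, List.drop_eq_getElem_cons hi, h1, List.take_succ_cons]
  congr 1
  rw [mid, List.take_add_one]
  congr 1
  rw [List.getElem?_drop]
  have h2 : i + 1 + (l.length - 2 * (i + 1)) = l.length - 1 - i := by omega
  rw [h2, List.getElem?_eq_getElem (by omega)]
  rfl

lemma contains_mid_step (l : List Char) (i : Nat) (h : 2 * i + 1 ≤ l.length) (v : Char) :
    ((mid l i).contains v)
      = ((v == l[i]'(by omega)) || (v == l[l.length - 1 - i]'(by omega))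
          || (mid l (i + 1)).contains v) := by
  by_cases h2 : 2 * i + 2 ≤ l.length
  · rw [mid_decomp l i h2, Bool.eq_iff_iff]
    simp only [List.contains_iff_mem, List.mem_cons, List.mem_append,
      beq_iff_eq, Bool.or_eq_true]
    tauto
  · have h1 : 2 * i + 1 = l.length := by omega
    have hsome : some (l[l.length - 1 - i]'(by omega)) = some (l[i]'(by omega)) := by
      rw [← List.getElem?_eq_getElem, ← List.getElem?_eq_getElem]
      congr 1
      omega
    rw [mid_single l i h1, mid_stop l (i + 1) (by omega), Option.some_inj.mp hsome,
      Bool.eq_iff_iff]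
    simp only [List.contains_iff_mem, List.mem_singleton, List.not_mem_nil,
      beq_iff_eq, Bool.or_eq_true]
    tauto

lemma pairsOK_stop (l : List Char) (i : Nat) (h : l.length < 2 * i + 1) :
    pairsOK l i = true := by
  apply decide_eq_true
  intro p hp hip h2
  omega

lemma pairsOK_step (l : List Char) (i : Nat) (h : 2 * i + 1 ≤ l.length) :
    pairsOK l i
      = ((l[i]'(by omega) == l[l.length - 1 - i]'(by omega)) && pairsOK l (i + 1)) := by
  rw [pairsOK, pairsOK, Bool.eq_iff_iff, decide_eq_true_iff, Bool.and_eq_true,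
    beq_iff_eq, decide_eq_true_iff]
  constructor
  · intro H
    refine ⟨?_, fun p hp hip h2 => H p hp (by omega) h2⟩
    have := H i (by omega) le_rfl h
    rwa [List.getElem?_eq_getElem (by omega), List.getElem?_eq_getElem (by omega),
      Option.some_inj] at this
  · rintro ⟨heq, H⟩ p hp hip h2
    rcases Nat.eq_or_lt_of_le hip with rfl | hlt
    · rw [List.getElem?_eq_getElem (by omega), List.getElem?_eq_getElem (by omega), heq]
    · exact H p hp (by omega) h2

lemma pairsOK_zero_iff (l : List Char) : pairsOK l 0 = true ↔ l.reverse = l := by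
  rw [pairsOK, decide_eq_true_iff]
  constructor
  · intro H
    apply List.ext_getElem (by simp)
    intro p hp hp'
    rw [List.getElem_reverse]
    apply Option.some_inj.mp
    rw [← List.getElem?_eq_getElem, ← List.getElem?_eq_getElem]
    by_cases h2 : 2 * p + 1 ≤ l.length
    · exact (H p hp' (by omega) h2).symm
    · have H2 := H (l.length - 1 - p) (by omega) (by omega) (by omega)
      have hidx : l[l.length - 1 - (l.length - 1 - p)]? = l[p]? := by
        congr 1
        omega
      rw [hidx] at H2
      exact H2
  · intro H p hp _ h2
    calc l[p]? = l.reverse[p]? := by rw [H]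
      _ = l[l.length - 1 - p]? := List.getElem?_reverse hp

-- membership in B's running vowel set after one conditional add
lemma mem_step_set (L : List Char) (seen : PySem.Set Char) (c v : Char) (hv : v ∈ L) :
    (v ∈ (if L.contains c = true then PySem.Set.add seen c else seen))
      ↔ (v ∈ seen ∨ v = c) := by
  by_cases hc : L.contains c = true
  · rw [if_pos hc, PySem.Set.mem_add]
  · rw [if_neg hc]
    have hne : v ≠ c := by
      rintro rfl
      exact hc (List.contains_iff_mem.mpr hv)
    constructor
    · exact Or.inl
    · rintro (hm | rfl)
      · exact hm
      · exact absurd rfl hne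

-- loop invariant: B's two-pointer loop from position i checks exactly the remaining
-- pairs and ends with the vowels of 'seen' plus those of the unscanned middle
lemma bLoop_eq_aux (l : List Char) :
    ∀ (k i : Nat) (seen : PySem.Set Char), l.length ≤ i + k →
      bLoop l i seen =
        (pairsOK l i &&
          ("aeiou".toList).all
            (fun v => PySem.Set.contains seen v || (mid l i).contains v)) := by
  intro k
  induction k with
  | zero =>
    intro i seen hk
    have hg : ¬ 2 * i + 1 ≤ l.length := by omega
    rw [bLoop, dif_neg hg, pairsOK_stop l i (by omega), Bool.true_and]
    refine List.all_congr rfl fun v => ?_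
    rw [mid_stop l i (by omega)]
    simp
  | succ k ih =>
    intro i seen hk
    by_cases hg : 2 * i + 1 ≤ l.length
    · rw [bLoop]
      simp only [dif_pos hg]
      by_cases hne : l[i]'(by omega) = l[l.length - 1 - i]'(by omega)
      · rw [if_neg (show ¬ (l[i]'(by omega) ≠ l[l.length - 1 - i]'(by omega)) from
          fun hh => hh hne)]
        rw [ih (i + 1) _ (by omega), pairsOK_step l i hg,
          show (l[i]'(by omega) == l[l.length - 1 - i]'(by omega)) = true from by
            simpa using hne,
          Bool.true_and]
        congr 1
        rw [Bool.eq_iff_iff]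
        simp only [List.all_eq_true]
        refine forall_congr' fun v => imp_congr_right fun hv => ?_
        rw [contains_mid_step l i hg v]
        simp only [Bool.or_eq_true, beq_iff_eq, PySem.Set.contains_iff]
        rw [mem_step_set _ _ _ v hv, mem_step_set _ _ _ v hv]
        tauto
      · rw [if_pos hne]
        have hpf : pairsOK l i = false := by
          rw [pairsOK]
          apply decide_eq_false
          intro H
          apply hne
          have := H i (by omega) le_rfl hg
          rwa [List.getElem?_eq_getElem (by omega), List.getElem?_eq_getElem (by omega),
            Option.some_inj] at this
        rw [hpf, Bool.false_and]
    · rw [bLoop, dif_neg hg, pairsOK_stop l i (by omega), Bool.true_and]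
      refine List.all_congr rfl fun v => ?_
      rw [mid_stop l i (by omega)]
      simp

lemma bLoop_eq (l : List Char) (seen : PySem.Set Char) :
    bLoop l 0 seen =
      (pairsOK l 0 &&
        ("aeiou".toList).all
          (fun v => PySem.Set.contains seen v || (mid l 0).contains v)) :=
  bLoop_eq_aux l l.length 0 seen (by omega)

-- ===== VERDICT (by name: the statement is the Claim_ definition above) =====
theorem all_vowels_palindrome_spec : Claim_equal_all_vowels_palindrome := by
  intro word _
  show all_vowels_palindrome word = all_vowels_palindrome_alt word
  rw [all_vowels_palindrome, all_vowels_palindrome_alt, bLoop_eq]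
  rw [PySem.List.slice?_none_none_neg_one, Option.getD_some, mid_zero, vowels_toList]
  by_cases hrev : word.toList.reverse = word.toList
  · have hb : (word.toList == word.toList.reverse) = true := by
      rw [beq_iff_eq, hrev]
    rw [hb, (pairsOK_zero_iff word.toList).mpr hrev]
    simp only [Bool.not_true, Bool.false_eq_true, if_false, Bool.true_and]
    have hemp : ∀ v : Char, PySem.Set.contains PySem.Set.empty v = false := fun _ => rfl
    simp only [aVowelLoop, singleton_isIn, List.all_cons, List.all_nil, hemp,
      Bool.false_or]
    cases ha : word.toList.contains 'a' <;>
      cases he : word.toList.contains 'e' <;>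
        cases hi : word.toList.contains 'i' <;>
          cases ho : word.toList.contains 'o' <;>
            cases hu : word.toList.contains 'u' <;> simp
  · have hb : (word.toList == word.toList.reverse) = false := by
      rw [beq_eq_false_iff_ne]
      exact fun h => hrev h.symm
    have hp : pairsOK word.toList 0 = false := by
      cases hpk : pairsOK word.toList 0
      · rfl
      · exact absurd ((pairsOK_zero_iff word.toList).mp hpk) hrev
    rw [hb, hp]
    simp
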